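-- pv_equiv track=rewrite | github.com/Zenith1009/Sem6 | SS/Labs/PythonLabs/Lab1/3_string_recognizer.py | recognize_pattern2
-- ===== SOURCE A (Python) =====
-- def recognize_pattern2(s):
--     """Pattern: a*b+a*  (zero or more a's, one or more b's, zero or more a's)"""
--     i = 0
--     while i < len(s) and s[i] == 'a':
--         i += 1
--     b_count = 0
--     while i < len(s) and s[i] == 'b':
--         b_count += 1
--         i += 1
--     if b_count == 0:
--         return False
--     while i < len(s) and s[i] == 'a':
--         i += 1
--     return i == len(s)
-- ===== SOURCE B (Python) =====
-- import re
--
-- def recognize_pattern2(s):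
--     """Pattern: a*b+a*, matched in one pass by the regex engine."""
--     return re.fullmatch(r'a*b+a*', s) is not None
-- ===== Notes on version B (the rewrite author's own statement) =====
-- stated objective: idiomatic
-- what changed: Replaced the three explicit index-based while-loop scan phases with a single re.fullmatch against the regex a*b+a*.
import Mathlib
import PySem

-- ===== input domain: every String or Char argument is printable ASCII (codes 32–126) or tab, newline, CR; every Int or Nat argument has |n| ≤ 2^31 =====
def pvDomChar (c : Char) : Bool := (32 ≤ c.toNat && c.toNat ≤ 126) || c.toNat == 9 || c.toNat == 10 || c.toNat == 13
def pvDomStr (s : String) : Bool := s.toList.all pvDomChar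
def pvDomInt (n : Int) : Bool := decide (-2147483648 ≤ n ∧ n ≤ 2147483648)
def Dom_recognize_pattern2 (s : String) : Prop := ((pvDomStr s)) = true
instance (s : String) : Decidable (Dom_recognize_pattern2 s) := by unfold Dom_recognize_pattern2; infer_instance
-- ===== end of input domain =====

-- B replaces A's three manual index-based while-loop scan phases with one regex fullmatch (idiomatic).

-- ===== PORT A =====
-- while i < len(s) and s[i] == 'a': i += 1   (returns the remaining suffix)
def pvASkipA : List Char → List Char
  | [] => []
  | c :: cs => if c = 'a' then pvASkipA cs else c :: cs

-- while i < len(s) and s[i] == 'b': b_count += 1; i += 1   (returns (b_count, remaining suffix))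
def pvACountB : List Char → Nat × List Char
  | [] => (0, [])
  | c :: cs => if c = 'b' then let r := pvACountB cs; (r.1 + 1, r.2) else (0, c :: cs)

def recognize_pattern2 (s : String) : Bool :=
  let t := pvASkipA s.toList
  let r := pvACountB t
  if r.1 = 0 then false
  else (pvASkipA r.2).isEmpty   -- third loop skips 'a's; 'return i == len(s)'

-- ===== PORT B =====
-- re.fullmatch(r'a*b+a*', s) is not None — hand port, exact for this regex:
-- a maximal 'a'* prefix, then a nonempty 'b'+ run, then only 'a's to the end.
def recognize_pattern2_alt (s : String) : Bool :=
  let t := s.toList.dropWhile (· = 'a')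
  let bs := t.takeWhile (· = 'b')
  !bs.isEmpty && (t.drop bs.length).all (· = 'a')

-- ===== PRECONDITION & SPEC =====
def Spec_recognize_pattern2 (s : String) (out : Bool) : Prop := out = recognize_pattern2_alt s
instance (s : String) (out : Bool) : Decidable (Spec_recognize_pattern2 s out) := by unfold Spec_recognize_pattern2; infer_instance

-- ===== CLAIM (what is proved, stated in full; the proofs are below) =====
def Claim_equal_recognize_pattern2 : Prop := ∀ (s : String), Dom_recognize_pattern2 s → Spec_recognize_pattern2 s (recognize_pattern2 s)

-- ===== LEMMAS AND PROOFS =====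
theorem pvASkipA_eq_dropWhile (l : List Char) : pvASkipA l = l.dropWhile (· = 'a') := by
  induction l with
  | nil => rfl
  | cons c cs ih =>
    simp only [pvASkipA, List.dropWhile]
    by_cases h : c = 'a' <;> simp [h, ih]

theorem pvACountB_fst (l : List Char) : (pvACountB l).1 = (l.takeWhile (· = 'b')).length := by
  induction l with
  | nil => rfl
  | cons c cs ih =>
    simp only [pvACountB, List.takeWhile]
    by_cases h : c = 'b' <;> simp [h, ih]

theorem pvACountB_snd (l : List Char) : (pvACountB l).2 = l.dropWhile (· = 'b') := by
  induction l with
  | nil => rfl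
  | cons c cs ih =>
    simp only [pvACountB, List.dropWhile]
    by_cases h : c = 'b' <;> simp [h, ih]

theorem drop_takeWhile_length (p : Char → Bool) (l : List Char) :
    l.drop (l.takeWhile p).length = l.dropWhile p := by
  induction l with
  | nil => rfl
  | cons c cs ih =>
    simp only [List.takeWhile, List.dropWhile]
    by_cases h : p c <;> simp [h, ih]

theorem dropWhile_isEmpty_eq_all (p : Char → Bool) (l : List Char) :
    (l.dropWhile p).isEmpty = l.all p := by
  induction l with
  | nil => rfl
  | cons c cs ih =>
    simp only [List.dropWhile, List.all_cons]
    by_cases h : p c <;> simp [h, ih]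

-- ===== VERDICT (by name: the statement is the Claim_ definition above) =====
theorem recognize_pattern2_spec : Claim_equal_recognize_pattern2 := by
  intro s _
  unfold Spec_recognize_pattern2 recognize_pattern2 recognize_pattern2_alt
  simp only [pvASkipA_eq_dropWhile, pvACountB_fst, pvACountB_snd,
    drop_takeWhile_length, dropWhile_isEmpty_eq_all]
  set t := s.toList.dropWhile (· = 'a') with ht
  by_cases h : (t.takeWhile (· = 'b')).length = 0
  · simp [List.length_eq_zero_iff.mp h]
  · have hne : (t.takeWhile (· = 'b')).isEmpty = false := by
      rcases hh : t.takeWhile (· = 'b') with _ | _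
      · exact absurd (by simp [hh]) h
      · simp
    simp [h, hne]
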